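-- pv_equiv track=rewrite | github.com/AlexVplle/leetcode | 3857-find-maximum-number-of-non-intersecting-substrings/solution.py | maxSubstrings
-- ===== SOURCE A (Python) =====
-- def maxSubstrings(word: str) -> int:
--     n = len(word)
--     intervals = []
--     for i in range(n):
--         for j in range(i + 3, n):
--             if word[i] == word[j]:
--                 intervals.append((i, j))
--                 break
--     intervals.sort(key=lambda x: x[1])
--     result = 0
--     previous_end = -1
--     for start, end in intervals:
--         if start > previous_end:
--             result += 1
--             previous_end = end
--     return result
-- ===== SOURCE B (Python) =====
-- def maxSubstrings(word: str) -> int: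
--     # O(n) single pass: greedily cut at the first position j whose character
--     # already occurred at least 3 positions earlier since the last cut.
--     count = 0
--     first = {}  # first index of each char seen since the last cut
--     for j, c in enumerate(word):
--         i = first.get(c)
--         if i is not None and j - i >= 3:
--             count += 1
--             first = {}
--         elif i is None:
--             first[c] = j
--     return count
-- ===== Notes on version B (the rewrite author's own statement) =====
-- stated objective: faster
-- what changed: Replaced A's build-all-intervals (quadratic nested scan) + sort-by-end + greedy sweep with a single O(n) pass that keeps the first index of each character seen since the last accepted cut and cuts greedily as soon as the current character was first seen >= 3 positions earlier.
import Mathlib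
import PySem

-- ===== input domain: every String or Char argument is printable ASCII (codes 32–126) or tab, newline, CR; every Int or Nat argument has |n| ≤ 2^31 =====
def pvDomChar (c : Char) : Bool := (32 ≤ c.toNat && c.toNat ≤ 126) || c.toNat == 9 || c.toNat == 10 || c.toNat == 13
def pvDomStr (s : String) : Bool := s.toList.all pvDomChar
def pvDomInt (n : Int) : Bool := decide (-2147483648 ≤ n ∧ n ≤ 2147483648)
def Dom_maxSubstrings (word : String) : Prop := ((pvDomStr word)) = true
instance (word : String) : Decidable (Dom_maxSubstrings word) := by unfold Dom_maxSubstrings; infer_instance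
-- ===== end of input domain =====

-- B replaces A's quadratic interval construction + sort + sweep by one O(n) greedy pass
-- over the string (first-seen index per character since the last cut); objective: faster.

-- ===== PORT A =====
-- A's inner loop: first j in range(i+3, n) with word[i] == word[j] ('break'), none if no match
def pvInnerA (l : List Char) (i j : Nat) : Option Nat :=
  if _h : j < l.length then
    if l[i]? = l[j]? then some j else pvInnerA l i (j + 1)
  else none
termination_by l.length - j

def maxSubstrings (word : String) : Int :=
  let l := word.toList
  let intervals := (List.range l.length).foldl
    (fun acc i =>
      match pvInnerA l i (i + 3) with
      | some j => acc ++ [(i, j)]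
      | none => acc) ([] : List (Nat × Nat))
  let sortedIntervals := PySem.List.sorted intervals (fun x => x.2) false
  (sortedIntervals.foldl
    (fun (st : Int × Int) x => if (x.1 : Int) > st.2 then (st.1 + 1, (x.2 : Int)) else st)
    (0, -1)).1

-- ===== PORT B =====
-- B's loop body: on (j, c), cut if c was first seen ≥ 3 positions ago since the last cut
def pvStepB (st : Int × PySem.Dict Char Int) (jc : Int × Char) : Int × PySem.Dict Char Int :=
  match PySem.Dict.get? st.2 jc.2 with
  | some i => if jc.1 - i ≥ 3 then (st.1 + 1, PySem.Dict.empty) else st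
  | none => (st.1, st.2.insert jc.2 jc.1)

def maxSubstrings_alt (word : String) : Int :=
  ((PySem.List.enumerate word.toList 0).foldl pvStepB (0, PySem.Dict.empty)).1

-- ===== PRECONDITION & SPEC =====
def Spec_maxSubstrings (word : String) (out : Int) : Prop := out = maxSubstrings_alt word
instance (word : String) (out : Int) : Decidable (Spec_maxSubstrings word out) := by unfold Spec_maxSubstrings; infer_instance

-- ===== CLAIM (what is proved, stated in full; the proofs are below) =====
def Claim_equal_maxSubstrings : Prop := ∀ (word : String), Dom_maxSubstrings word → Spec_maxSubstrings word (maxSubstrings word)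

-- ===== LEMMAS AND PROOFS =====

-- 'position k is a possible cut end for a window starting after p'
def pvPred (l : List Char) (p : Int) (k : Nat) : Bool :=
  (List.range k).any (fun i => decide (p < (i : Int)) && decide (i + 3 ≤ k) && (l[i]? == l[k]?))

lemma pvPred_iff (l : List Char) (p : Int) (k : Nat) :
    pvPred l p k = true ↔ ∃ i : Nat, p < (i : Int) ∧ i + 3 ≤ k ∧ l[i]? = l[k]? := by
  simp only [pvPred, List.any_eq_true, List.mem_range, Bool.and_eq_true, decide_eq_true_eq,
    beq_iff_eq]
  constructor
  · rintro ⟨i, _, ⟨h1, h2⟩, h3⟩; exact ⟨i, h1, h2, h3⟩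
  · rintro ⟨i, h1, h2, h3⟩; exact ⟨i, by omega, ⟨h1, h2⟩, h3⟩

-- first cut end ≥ j
def pvNextEnd (l : List Char) (p : Int) (j : Nat) : Option Nat :=
  if _h : j < l.length then
    if pvPred l p j then some j else pvNextEnd l p (j + 1)
  else none
termination_by l.length - j

lemma pvNextEnd_some (l : List Char) (p : Int) (j e : Nat)
    (h : pvNextEnd l p j = some e) :
    j ≤ e ∧ e < l.length ∧ pvPred l p e = true ∧
      ∀ k, j ≤ k → k < e → pvPred l p k = false := by
  fun_induction pvNextEnd l p j with
  | case1 j hj hp =>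
    simp only [Option.some.injEq] at h
    subst h
    exact ⟨le_refl _, hj, hp, fun k hk1 hk2 => by omega⟩
  | case2 j hj hp ih =>
    obtain ⟨h1, h2, h3, h4⟩ := ih h
    refine ⟨by omega, h2, h3, fun k hk1 hk2 => ?_⟩
    rcases Nat.eq_or_lt_of_le hk1 with rfl | hlt
    · simpa using hp
    · exact h4 k hlt hk2
  | case3 j hj => simp at h

lemma pvNextEnd_eq_some (l : List Char) (p : Int) (j e : Nat)
    (hj : j ≤ e) (he : e < l.length) (hp : pvPred l p e = true)
    (hmin : ∀ k, j ≤ k → k < e → pvPred l p k = false) :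
    pvNextEnd l p j = some e := by
  fun_induction pvNextEnd l p j with
  | case1 j hj' hp' =>
    rcases Nat.eq_or_lt_of_le hj with rfl | hlt
    · rfl
    · have := hmin j (le_refl _) hlt
      simp [this] at hp'
  | case2 j hj' hp' ih =>
    rcases Nat.eq_or_lt_of_le hj with rfl | hlt
    · simp [hp] at hp'
    · exact ih (by omega) (fun k hk1 hk2 => hmin k (by omega) hk2)
  | case3 j hj' => omega

lemma pvInnerA_some (l : List Char) (i j0 j : Nat)
    (h : pvInnerA l i j0 = some j) :
    j0 ≤ j ∧ j < l.length ∧ l[i]? = l[j]? ∧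
      ∀ k, j0 ≤ k → k < j → l[i]? ≠ l[k]? := by
  fun_induction pvInnerA l i j0 with
  | case1 j0 hj hc =>
    simp only [Option.some.injEq] at h
    subst h
    exact ⟨le_refl _, hj, hc, fun k hk1 hk2 => by omega⟩
  | case2 j0 hj hc ih =>
    obtain ⟨h1, h2, h3, h4⟩ := ih h
    refine ⟨by omega, h2, h3, fun k hk1 hk2 => ?_⟩
    rcases Nat.eq_or_lt_of_le hk1 with rfl | hlt
    · exact hc
    · exact h4 k hlt hk2
  | case3 j0 hj => simp at h

lemma pvInnerA_none (l : List Char) (i j0 : Nat)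
    (h : pvInnerA l i j0 = none) :
    ∀ k, j0 ≤ k → k < l.length → l[i]? ≠ l[k]? := by
  fun_induction pvInnerA l i j0 with
  | case1 j0 hj hc => simp at h
  | case2 j0 hj hc ih =>
    intro k hk1 hk2
    rcases Nat.eq_or_lt_of_le hk1 with rfl | hlt
    · exact hc
    · exact ih h k hlt hk2
  | case3 j0 hj => intro k hk1 hk2; omega

-- a match at k yields an A-interval with end ≤ k
lemma pvInnerA_le (l : List Char) (i k : Nat)
    (hk : k < l.length) (h3 : i + 3 ≤ k) (hc : l[i]? = l[k]?) :
    ∃ e, pvInnerA l i (i + 3) = some e ∧ e ≤ k := by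
  cases h : pvInnerA l i (i + 3) with
  | none => exact absurd hc (pvInnerA_none l i (i + 3) h k h3 hk)
  | some e =>
    refine ⟨e, rfl, ?_⟩
    by_contra hke
    exact (pvInnerA_some l i (i + 3) e h).2.2.2 k h3 (by omega) hc

lemma pvPred_to_interval (l : List Char) (p : Int) (k : Nat)
    (hk : k < l.length) (h : pvPred l p k = true) :
    ∃ s e, pvInnerA l s (s + 3) = some e ∧ p < (s : Int) ∧ e ≤ k := by
  obtain ⟨i, h1, h2, h3⟩ := (pvPred_iff l p k).1 h
  obtain ⟨e, he, hle⟩ := pvInnerA_le l i k hk h2 h3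
  exact ⟨i, e, he, h1, hle⟩

lemma pvPred_lt (l : List Char) (p : Int) (k : Nat) (h : pvPred l p k = true) :
    p < (k : Int) := by
  obtain ⟨i, h1, h2, _⟩ := (pvPred_iff l p k).1 h
  omega

-- the reference count: number of greedy cuts starting strictly after position p
def pvSpec (l : List Char) (p : Int) : Int :=
  match h : pvNextEnd l p 0 with
  | none => 0
  | some e => 1 + pvSpec l (e : Int)
termination_by (l.length + 1) - (p + 1).toNat
decreasing_by
  obtain ⟨_, h2, h3, _⟩ := pvNextEnd_some l p 0 e h
  have := pvPred_lt l p e h3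
  omega

lemma pvSpec_none (l : List Char) (p : Int) (h : pvNextEnd l p 0 = none) :
    pvSpec l p = 0 := by
  rw [pvSpec.eq_def]
  split <;> simp_all

lemma pvSpec_some (l : List Char) (p : Int) (e : Nat)
    (h : pvNextEnd l p 0 = some e) :
    pvSpec l p = 1 + pvSpec l (e : Int) := by
  rw [pvSpec.eq_def]
  split <;> simp_all

-- A's interval-building fold is a filterMap
lemma pvFoldFM (l : List Char) :
    ∀ (xs : List Nat) (init : List (Nat × Nat)),
      xs.foldl (fun acc i =>
        match pvInnerA l i (i + 3) with
        | some j => acc ++ [(i, j)]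
        | none => acc) init
      = init ++ xs.filterMap (fun i => (pvInnerA l i (i + 3)).map (fun j => (i, j))) := by
  intro xs
  induction xs with
  | nil => simp
  | cons x xs ih =>
    intro init
    cases hF : pvInnerA l x (x + 3) <;> simp [hF, ih]

lemma pvMem_intervals (l : List Char) (s e : Nat) :
    (s, e) ∈ (List.range l.length).filterMap
        (fun i => (pvInnerA l i (i + 3)).map (fun j => (i, j)))
      ↔ pvInnerA l s (s + 3) = some e := by
  simp only [List.mem_filterMap, List.mem_range, Option.map_eq_some_iff]
  constructor
  · rintro ⟨i, _, j, hj, heq⟩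
    cases heq
    exact hj
  · intro h
    obtain ⟨_, he, hc, _⟩ := pvInnerA_some l s (s + 3) e h
    have hs : s < l.length := by
      by_contra hns
      rw [List.getElem?_eq_none (by omega)] at hc
      have := List.getElem?_eq_none_iff.1 hc.symm
      omega
    exact ⟨s, hs, e, h, rfl⟩

-- A's greedy sweep over any end-sorted list holding exactly the intervals that still matter
lemma pvGreedy (l : List Char) :
    ∀ (xs : List (Nat × Nat)) (res p : Int),
      xs.Pairwise (fun a b => a.2 ≤ b.2) →
      (∀ s e, (s, e) ∈ xs → pvInnerA l s (s + 3) = some e) →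
      (∀ s e, pvInnerA l s (s + 3) = some e → p < (s : Int) → (s, e) ∈ xs) →
      (xs.foldl
        (fun (st : Int × Int) x => if (x.1 : Int) > st.2 then (st.1 + 1, (x.2 : Int)) else st)
        (res, p)).1 = res + pvSpec l p := by
  intro xs
  induction xs with
  | nil =>
    intro res p _ _ h3
    cases h : pvNextEnd l p 0 with
    | none => simp [pvSpec_none l p h]
    | some e =>
      obtain ⟨_, he, hp, _⟩ := pvNextEnd_some l p 0 e h
      obtain ⟨s, e', hA, hps, _⟩ := pvPred_to_interval l p e he hp
      exact absurd (h3 s e' hA hps) (List.not_mem_nil)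
  | cons hd tl ih =>
    intro res p hpw h2 h3
    obtain ⟨s0, e0⟩ := hd
    have hA0 : pvInnerA l s0 (s0 + 3) = some e0 := h2 s0 e0 List.mem_cons_self
    obtain ⟨hj0, he0, hc0, _⟩ := pvInnerA_some l s0 (s0 + 3) e0 hA0
    by_cases hs : (s0 : Int) > p
    · -- accept head
      have hpred : pvPred l p e0 = true :=
        (pvPred_iff l p e0).2 ⟨s0, hs, hj0, hc0⟩
      have hmin : ∀ k, 0 ≤ k → k < e0 → pvPred l p k = false := by
        intro k _ hk
        by_contra hkp
        have hkp' : pvPred l p k = true := by simpa using hkp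
        obtain ⟨s', e', hA', hps', hle'⟩ :=
          pvPred_to_interval l p k (by omega) hkp'
        have hmem := h3 s' e' hA' hps'
        rcases List.mem_cons.1 hmem with heq | hmem'
        · have : e' = e0 := congrArg Prod.snd heq
          omega
        · have := (List.pairwise_cons.1 hpw).1 _ hmem'
          simp only at this
          omega
      have hne : pvNextEnd l p 0 = some e0 :=
        pvNextEnd_eq_some l p 0 e0 (by omega) he0 hpred hmin
      have hstep :
          ((s0, e0) :: tl).foldl
            (fun (st : Int × Int) x => if (x.1 : Int) > st.2 then (st.1 + 1, (x.2 : Int)) else st)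
            (res, p)
          = tl.foldl
            (fun (st : Int × Int) x => if (x.1 : Int) > st.2 then (st.1 + 1, (x.2 : Int)) else st)
            (res + 1, (e0 : Int)) := by
        simp [hs]
      rw [hstep, ih (res + 1) (e0 : Int) (List.pairwise_cons.1 hpw).2
        (fun s e hm => h2 s e (List.mem_cons_of_mem _ hm)) ?_,
        pvSpec_some l p e0 hne]
      · ring
      · intro s e hA hps
        have hmem := h3 s e hA (by omega)
        rcases List.mem_cons.1 hmem with heq | hmem'
        · exfalso
          have hs0 : s = s0 := congrArg Prod.fst heq
          omega
        · exact hmem'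
    · -- skip head
      have hstep :
          ((s0, e0) :: tl).foldl
            (fun (st : Int × Int) x => if (x.1 : Int) > st.2 then (st.1 + 1, (x.2 : Int)) else st)
            (res, p)
          = tl.foldl
            (fun (st : Int × Int) x => if (x.1 : Int) > st.2 then (st.1 + 1, (x.2 : Int)) else st)
            (res, p) := by
        simp [hs]
      rw [hstep]
      refine ih res p (List.pairwise_cons.1 hpw).2
        (fun s e hm => h2 s e (List.mem_cons_of_mem _ hm)) ?_
      intro s e hA hps
      have hmem := h3 s e hA hps
      rcases List.mem_cons.1 hmem with heq | hmem'
      · exfalso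
        have hs0 : s = s0 := congrArg Prod.fst heq
        omega
      · exact hmem'

-- window-occurrence predicate and the list of occurrences of c in the open window (p, q)
def pvWin (l : List Char) (p : Int) (c : Char) (i : Nat) : Bool :=
  decide (p < (i : Int)) && (l[i]? == some c)

def pvL (l : List Char) (p : Int) (q : Nat) (c : Char) : List Nat :=
  (List.range q).filter (pvWin l p c)

lemma pvMem_pvL (l : List Char) (p : Int) (q : Nat) (c : Char) (i : Nat) :
    i ∈ pvL l p q c ↔ i < q ∧ p < (i : Int) ∧ l[i]? = some c := by
  simp [pvL, pvWin, List.mem_filter]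

lemma pvL_succ (l : List Char) (p : Int) (q : Nat) (c c0 : Char)
    (hlq : l[q]? = some c0) (hpq : p < (q : Int)) :
    pvL l p (q + 1) c = pvL l p q c ++ (if c = c0 then [q] else []) := by
  unfold pvL
  rw [List.range_succ, List.filter_append]
  congr 1
  by_cases hc : c = c0
  · subst hc
    simp [pvWin, hlq, hpq]
  · simp [pvWin, hlq, hc, Ne.symm hc]

lemma pvL_pairwise (l : List Char) (p : Int) (q : Nat) (c : Char) :
    (pvL l p q c).Pairwise (· < ·) :=
  List.Pairwise.filter _ (List.pairwise_lt_range)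

-- B's invariant: d holds the first occurrence of each char in the open window (p, q)
lemma pvBfold (l : List Char) :
    ∀ (rest : List Char) (q : Nat) (cnt p : Int) (d : PySem.Dict Char Int),
      rest = l.drop q →
      p < (q : Int) →
      (∀ c : Char, d.get? c = ((pvL l p q c).head?).map (fun i : Nat => (i : Int))) →
      (∀ k : Nat, k < q → pvPred l p k = false) →
      ((PySem.List.enumerate rest (q : Int)).foldl pvStepB (cnt, d)).1 = cnt + pvSpec l p := by
  intro rest
  induction rest with
  | nil =>
    intro q cnt p d hrest hpq hd hno
    have hlen : l.length ≤ q := by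
      by_contra hc
      have := List.drop_eq_nil_iff.1 hrest.symm
      omega
    have hne : pvNextEnd l p 0 = none := by
      cases h : pvNextEnd l p 0 with
      | none => rfl
      | some e =>
        obtain ⟨_, he, hp, _⟩ := pvNextEnd_some l p 0 e h
        exact absurd hp (by simp [hno e (by omega)])
    simp [PySem.List.enumerate_nil, pvSpec_none l p hne]
  | cons c0 rest' ih =>
    intro q cnt p d hrest hpq hd hno
    have hq : q < l.length := by
      by_contra hc
      rw [List.drop_eq_nil_iff.2 (by omega)] at hrest
      simp at hrest
    have hlq : l[q]? = some c0 := by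
      have h0 : (l.drop q)[0]? = some c0 := by rw [← hrest]; rfl
      simpa using h0
    have hrest' : rest' = l.drop (q + 1) := by
      have ht : (c0 :: rest').tail = (l.drop q).tail := by rw [hrest]
      simpa [List.tail_drop] using ht
    rw [PySem.List.enumerate_cons]
    have hcast : ((q : Int) + 1) = (((q + 1 : Nat)) : Int) := by push_cast; ring
    cases hg : d.get? c0 with
    | none =>
      -- first occurrence of c0 in the window: record it
      have hLnil : pvL l p q c0 = [] := by
        have hdc := hd c0
        rw [hg] at hdc
        cases hL : pvL l p q c0 with
        | nil => rfl
        | cons a t => rw [hL] at hdc; simp at hdc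
      have hnoq : pvPred l p q = false := by
        by_contra hc
        have hc' : pvPred l p q = true := by simpa using hc
        obtain ⟨i, h1, h2, h3⟩ := (pvPred_iff l p q).1 hc'
        have hi : i ∈ pvL l p q c0 := by
          rw [hlq] at h3
          exact (pvMem_pvL l p q c0 i).2 ⟨by omega, h1, h3⟩
        rw [hLnil] at hi
        simp at hi
      have hstep : pvStepB (cnt, d) ((q : Int), c0) = (cnt, d.insert c0 (q : Int)) := by
        simp [pvStepB, hg]
      rw [List.foldl_cons, hstep, hcast]
      rw [ih (q + 1) cnt p (d.insert c0 (q : Int)) hrest' (by push_cast; omega) ?_ ?_]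
      · intro c
        by_cases hc : c = c0
        · rw [hc, PySem.Dict.get?_insert_self, pvL_succ l p q c0 c0 hlq hpq, hLnil]
          simp
        · rw [PySem.Dict.get?_insert_of_ne _ _ hc, hd c, pvL_succ l p q c c0 hlq hpq]
          simp [hc]
      · intro k hk
        rcases Nat.lt_succ_iff_lt_or_eq.1 hk with hk' | rfl
        · exact hno k hk'
        · exact hnoq
    | some i =>
      -- c0 already seen: the head of the occurrence list is its first occurrence
      have hdL := hd c0
      rw [hg] at hdL
      obtain ⟨i0, hi0head, hi0val⟩ :
          ∃ i0 : Nat, (pvL l p q c0).head? = some i0 ∧ i = (i0 : Int) := by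
        cases hL : (pvL l p q c0).head? with
        | none => rw [hL] at hdL; simp at hdL
        | some a =>
          rw [hL] at hdL
          simp only [Option.map_some, Option.some.injEq] at hdL
          exact ⟨a, rfl, hdL⟩
      obtain ⟨t, hLcons⟩ := List.head?_eq_some_iff.1 hi0head
      have hi0mem : i0 ∈ pvL l p q c0 := by
        rw [hLcons]; exact List.mem_cons_self
      obtain ⟨hi0q, hi0p, hi0c⟩ := (pvMem_pvL l p q c0 i0).1 hi0mem
      -- i0 is minimal among window occurrences of c0
      have hi0min : ∀ i' : Nat, p < (i' : Int) → i' < q → l[i']? = some c0 → i0 ≤ i' := by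
        intro i' h1 h2 h3
        have hmem : i' ∈ pvL l p q c0 := (pvMem_pvL l p q c0 i').2 ⟨h2, h1, h3⟩
        rw [hLcons] at hmem
        rcases List.mem_cons.1 hmem with rfl | hmem'
        · exact le_refl _
        · have hpw := pvL_pairwise l p q c0
          rw [hLcons] at hpw
          exact le_of_lt ((List.pairwise_cons.1 hpw).1 _ hmem')
      subst hi0val
      by_cases hcut : (q : Int) - (i0 : Int) ≥ 3
      · -- cut here
        have hstep : pvStepB (cnt, d) ((q : Int), c0) = (cnt + 1, PySem.Dict.empty) := by
          simp [pvStepB, hg, hcut]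
        have hpredq : pvPred l p q = true := by
          refine (pvPred_iff l p q).2 ⟨i0, hi0p, by omega, by rw [hi0c, hlq]⟩
        have hne : pvNextEnd l p 0 = some q :=
          pvNextEnd_eq_some l p 0 q (by omega) hq hpredq (fun k _ hk => hno k hk)
        rw [List.foldl_cons, hstep, hcast]
        rw [ih (q + 1) (cnt + 1) (q : Int) PySem.Dict.empty hrest' (by push_cast; omega) ?_ ?_,
          pvSpec_some l p q hne]
        · ring
        · intro c
          rw [PySem.Dict.get?_empty]
          have hLq : pvL l (q : Int) (q + 1) c = [] := by
            apply List.filter_eq_nil_iff.2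
            intro a ha
            simp only [List.mem_range] at ha
            simp only [pvWin, Bool.and_eq_true, decide_eq_true_eq, beq_iff_eq, not_and]
            intro hqa
            exfalso
            omega
          rw [hLq]
          rfl
        · intro k _
          by_contra hc
          have hc' : pvPred l (q : Int) k = true := by simpa using hc
          obtain ⟨i', h1, h2, _⟩ := (pvPred_iff l (q : Int) k).1 hc'
          omega
      · -- too close: no change
        have hstep : pvStepB (cnt, d) ((q : Int), c0) = (cnt, d) := by
          simp [pvStepB, hg, hcut]
        have hnoq : pvPred l p q = false := by
          by_contra hc
          have hc' : pvPred l p q = true := by simpa using hc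
          obtain ⟨i', h1, h2, h3⟩ := (pvPred_iff l p q).1 hc'
          rw [hlq] at h3
          have := hi0min i' h1 (by omega) h3
          omega
        rw [List.foldl_cons, hstep, hcast]
        rw [ih (q + 1) cnt p d hrest' (by push_cast; omega) ?_ ?_]
        · intro c
          rw [hd c, pvL_succ l p q c c0 hlq hpq]
          by_cases hc : c = c0
          · rw [hc, hLcons]
            simp
          · simp [hc]
        · intro k hk
          rcases Nat.lt_succ_iff_lt_or_eq.1 hk with hk' | rfl
          · exact hno k hk'
          · exact hnoq

-- ===== VERDICT (by name: the statement is the Claim_ definition above) =====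
theorem maxSubstrings_spec : Claim_equal_maxSubstrings := by
  intro word _
  unfold Spec_maxSubstrings
  have hB : maxSubstrings_alt word = ((0 : Nat) : Int) + pvSpec word.toList (-1) := by
    unfold maxSubstrings_alt
    have h0 : (0 : Int) = ((0 : Nat) : Int) := by norm_num
    rw [h0]
    exact pvBfold word.toList word.toList 0 ((0 : Nat) : Int) (-1) PySem.Dict.empty rfl
      (by norm_num)
      (fun c => by simp [pvL, PySem.Dict.get?_empty])
      (fun k hk => by omega)
  have hA : maxSubstrings word = ((0 : Nat) : Int) + pvSpec word.toList (-1) := by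
    simp only [maxSubstrings]
    rw [pvFoldFM, List.nil_append]
    have h0 : ((0 : Nat) : Int) = (0 : Int) := by norm_num
    rw [h0]
    exact pvGreedy word.toList _ 0 (-1)
      (PySem.List.sorted_pairwise _ _)
      (fun s e hm => (pvMem_intervals word.toList s e).1 ((PySem.List.mem_sorted _ _ _ _).1 hm))
      (fun s e hA' _ => (PySem.List.mem_sorted _ _ _ _).2 ((pvMem_intervals word.toList s e).2 hA'))
  rw [hA, hB]
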